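-- pv_equiv track=rewrite | github.com/kangminchan99/coding_test_python | 프로그래머스/코딩 기초 트레이닝/Lv0 - 코드 처리하기.py | solution
-- ===== SOURCE A (Python) =====
-- def solution(code):
--     answer = []
--     dic = {'mode': 0}
--
--     for i in range(len(code)):
--         if code[i] == '1' and dic['mode'] == 0:
--             dic['mode'] = 1
--             continue
--
--         if code[i] == '1' and dic['mode'] == 1:
--             dic['mode'] = 0
--             continue
--
--
--         if code[i] != '1' and dic['mode'] == 0 and i % 2 == 0:
--             answer.append(code[i])
--
--         if code[i] != '1' and dic['mode'] == 1 and i % 2 != 0: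
--             answer.append(code[i])
--
--
--
-- # ret가 만약 빈 문자열이라면 대신 "EMPTY"를 return 합니다.
--     if answer == []:
--         answer.append("EMPTY")
--
--
--     return ''.join(answer)
-- ===== SOURCE B (Python) =====
-- def solution(code):
--     # Segments between '1' separators: the k-th segment was decoded with mode k%2
--     # (mode = parity of '1's seen so far), so from the segment starting at global
--     # offset pos we keep every second character, starting at local offset (k+pos)%2.
--     parts = []
--     pos = 0
--     for k, seg in enumerate(code.split('1')):
--         parts.append(seg[(k + pos) % 2::2])
--         pos += len(seg) + 1
--     out = ''.join(parts)
--     return out or 'EMPTY'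
-- ===== Notes on version B (the rewrite author's own statement) =====
-- stated objective: faster
-- what changed: Replaces A's per-character loop with a mode flag and four guarded branches by splitting the string on the separator into segments and taking one stride-2 slice seg[(k+pos)%2::2] from each segment (the k-th segment's kept characters are exactly every second one, starting where index parity matches k%2); no per-character mode test remains.
import Mathlib
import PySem

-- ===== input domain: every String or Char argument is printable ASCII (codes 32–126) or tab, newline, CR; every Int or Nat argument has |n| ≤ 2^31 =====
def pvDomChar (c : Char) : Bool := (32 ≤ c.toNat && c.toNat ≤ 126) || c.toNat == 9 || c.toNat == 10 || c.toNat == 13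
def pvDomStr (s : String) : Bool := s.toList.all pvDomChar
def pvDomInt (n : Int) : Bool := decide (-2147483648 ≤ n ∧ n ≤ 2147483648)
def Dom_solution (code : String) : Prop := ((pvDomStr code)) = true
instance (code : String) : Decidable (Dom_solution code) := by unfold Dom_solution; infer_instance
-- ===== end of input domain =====

-- B replaces A's per-character mode-toggling loop by splitting on the separator and taking a stride-2 slice of each segment (same O(n) class; a timing run measured B faster by a constant factor).

-- ===== PORT A =====
-- A's one-key dict {'mode': m} is ported as its single Int value m; the loop
-- 'for i in range(len(code))' reading code[i] is ported as a fold over the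
-- enumerated character list (the same (i, code[i]) pairs, in order).
def pvStepA (st : List (List Char) × Int) (p : Int × Char) : List (List Char) × Int :=
  let answer := st.1
  let mode := st.2
  let i := p.1
  let c := p.2
  if c = '1' ∧ mode = 0 then (answer, 1)
  else if c = '1' ∧ mode = 1 then (answer, 0)
  else
    let answer := if c ≠ '1' ∧ mode = 0 ∧ PySem.Int.mod i 2 = 0 then answer ++ [[c]] else answer
    let answer := if c ≠ '1' ∧ mode = 1 ∧ PySem.Int.mod i 2 ≠ 0 then answer ++ [[c]] else answer
    (answer, mode)

def solution (code : String) : String :=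
  let st := (PySem.List.enumerate code.toList 0).foldl pvStepA ([], 0)
  let answer := if st.1 = [] then [['E','M','P','T','Y']] else st.1
  String.ofList (PySem.Chars.join [] answer)

-- ===== PORT B =====
-- Source B's loop body: append seg[(k+pos)%2::2] to parts, advance pos
def pvStepB (st : List (List Char) × Int) (p : Int × List Char) : List (List Char) × Int :=
  let parts := st.1
  let pos := st.2
  let k := p.1
  let seg := p.2
  (parts ++ [(PySem.List.slice? seg (some (PySem.Int.mod (k + pos) 2)) none 2).getD []],
   pos + seg.length + 1)

def solution_alt (code : String) : String :=
  let segs := PySem.Chars.splitOn code.toList ['1']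
  let st := (PySem.List.enumerate segs 0).foldl pvStepB ([], 0)
  let out := PySem.Chars.join [] st.1
  if out = [] then "EMPTY" else String.ofList out

-- ===== PRECONDITION & SPEC =====
def Spec_solution (code : String) (out : String) : Prop := out = solution_alt code
instance (code : String) (out : String) : Decidable (Spec_solution code out) := by unfold Spec_solution; infer_instance

-- ===== CLAIM (what is proved, stated in full; the proofs are below) =====
def Claim_equal_solution : Prop := ∀ (code : String), Dom_solution code → Spec_solution code (solution code)

-- ===== LEMMAS AND PROOFS =====

-- common characterisation: chars kept from position i onward with current parity m
def pvPick (i m : Int) : List Char → List Char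
  | [] => []
  | c :: cs =>
      if c = '1' then pvPick (i + 1) (1 - m) cs
      else (if PySem.Int.mod i 2 = m then [c] else []) ++ pvPick (i + 1) m cs

-- every second element (indices 0,2,4,…)
def pvEvery2 : List Char → List Char
  | [] => []
  | [c] => [c]
  | c :: _ :: cs => c :: pvEvery2 cs

-- split on '1', recursive form
def pvSplit1 : List Char → List (List Char)
  | [] => [[]]
  | c :: cs =>
      if c = '1' then [] :: pvSplit1 cs
      else match pvSplit1 cs with
        | [] => [[c]]          -- unreachable: pvSplit1 is never []
        | s :: ss => (c :: s) :: ss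

-- B-side spec on segment lists
def pvSegJoin (k pos : Int) : List (List Char) → List Char
  | [] => []
  | seg :: segs =>
      pvEvery2 (seg.drop (PySem.Int.mod (k + pos) 2).toNat)
        ++ pvSegJoin (k + 1) (pos + seg.length + 1) segs

lemma pvSplit1_ne_nil (l : List Char) : pvSplit1 l ≠ [] := by
  cases l with
  | nil => simp [pvSplit1]
  | cons c cs =>
    simp only [pvSplit1]
    split_ifs
    · simp
    · cases h : pvSplit1 cs <;> simp

lemma pvA_loop (l : List Char) : ∀ (i : Int) (ans : List (List Char)) (m : Int),
    m = 0 ∨ m = 1 →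
    ((PySem.List.enumerate l i).foldl pvStepA (ans, m)).1
      = ans ++ (pvPick i m l).map (fun c => [c]) := by
  induction l with
  | nil => intro i ans m _; simp [pvPick]
  | cons c cs ih =>
    intro i ans m hm
    rw [PySem.List.enumerate_cons]
    by_cases hc : c = '1'
    · rcases hm with rfl | rfl
      · simp [List.foldl, pvStepA, hc, pvPick, ih (i + 1) ans 1 (Or.inr rfl)]
      · simp [List.foldl, pvStepA, hc, pvPick, ih (i + 1) ans 0 (Or.inl rfl)]
    · have h0 : (0 : Int) < 2 := by norm_num
      have hge := PySem.Int.mod_nonneg i h0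
      have hlt := PySem.Int.mod_lt i h0
      by_cases hp : PySem.Int.mod i 2 = m
      · rcases hm with rfl | rfl <;>
          simp_all [List.foldl, pvStepA, pvPick, ih (i + 1) _ _]
      · rcases hm with rfl | rfl <;>
          simp_all [List.foldl, pvStepA, pvPick, ih (i + 1) _ _]

def pvMapHead (f : List Char → List Char) : List (List Char) → List (List Char)
  | [] => []
  | s :: ss => f s :: ss

lemma pvGo (l : List Char) : ∀ (fuel : Nat) (cur : List Char) (acc : List (List Char)),
    l.length < fuel →
    PySem.Chars.splitOn.go ['1'] fuel l cur acc
      = acc.reverse ++ pvMapHead (fun s => cur.reverse ++ s) (pvSplit1 l) := by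
  induction l with
  | nil =>
    intro fuel cur acc hf
    cases fuel with
    | zero => omega
    | succ f => simp [PySem.Chars.splitOn.go, pvSplit1, pvMapHead]
  | cons c cs ih =>
    intro fuel cur acc hf
    cases fuel with
    | zero => simp at hf
    | succ f =>
      rw [PySem.Chars.splitOn.go]
      by_cases hc : c = '1'
      · have hpre : (['1'].isPrefixOf (c :: cs)) = true := by simp [List.isPrefixOf, hc]
        rw [if_pos hpre]
        have := ih f [] (cur.reverse :: acc) (by simpa using hf)
        simp only [List.length_cons, List.length_nil, List.drop_succ_cons, List.drop_zero] at this ⊢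
        rw [this]
        simp only [pvSplit1, if_pos hc, pvMapHead, List.reverse_cons, List.reverse_nil,
          List.nil_append, List.append_assoc, List.singleton_append]
        cases pvSplit1 cs <;> simp [pvMapHead]
      · have hpre : (['1'].isPrefixOf (c :: cs)) = false := by
          simp only [List.isPrefixOf, Bool.and_eq_false_iff, beq_eq_false_iff_ne, ne_eq]
          exact Or.inl fun h => hc h.symm
        rw [if_neg (by simp [hpre])]
        rw [ih f (c :: cur) acc (by simpa using hf)]
        simp only [pvSplit1, if_neg hc]
        cases hsp : pvSplit1 cs with
        | nil => exact absurd hsp (pvSplit1_ne_nil cs)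
        | cons s ss => simp [pvMapHead]

-- splitOn agrees with pvSplit1
lemma pvSplitOn_eq (l : List Char) : PySem.Chars.splitOn l ['1'] = pvSplit1 l := by
  rw [PySem.Chars.splitOn, pvGo l (l.length + 1) [] [] (by omega)]
  cases hsp : pvSplit1 l with
  | nil => exact absurd hsp (pvSplit1_ne_nil l)
  | cons s ss => simp [pvMapHead]

lemma pvEvery2_cons (c : Char) (s : List Char) :
    pvEvery2 (c :: s) = c :: pvEvery2 (s.drop 1) := by
  cases s <;> simp [pvEvery2]

-- core: picking indices 0,2,4,… via range/filterMap is pvEvery2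
lemma pvFMR (l : List Char) :
    List.filterMap (fun k => l[2 * k]?) (List.range ((l.length + 1) / 2)) = pvEvery2 l := by
  induction l using pvEvery2.induct with
  | case1 => simp [pvEvery2]
  | case2 c => simp [pvEvery2, List.range_succ]
  | case3 c d cs ih =>
    have hcount : ((c :: d :: cs).length + 1) / 2 = (cs.length + 1) / 2 + 1 := by
      simp only [List.length_cons]; omega
    rw [hcount, List.range_succ_eq_map, List.filterMap_cons, List.filterMap_map]
    have hfun : ((fun k => (c :: d :: cs)[2 * k]?) ∘ Nat.succ) = fun k => cs[2 * k]? := by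
      funext k
      have h2 : 2 * Nat.succ k = 2 * k + 1 + 1 := by omega
      simp [Function.comp, h2]
    rw [hfun, ih]
    simp [pvEvery2]

-- slicing with stride 2 from a nonnegative start is pvEvery2 of a drop
lemma pvSlice2 (l : List Char) (s : Int) (hs : 0 ≤ s) :
    (PySem.List.slice? l (some s) none 2).getD [] = pvEvery2 (l.drop s.toNat) := by
  rw [PySem.List.slice?, PySem.List.sliceIndices]
  simp only [if_neg (show ¬ ((2:Int) = 0) by norm_num),
    if_neg (show ¬ ((2:Int) < 0) by norm_num),
    if_pos (show (0:Int) < 2 by norm_num), if_neg (show ¬ (s < 0) by omega),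
    Option.getD_some]
  by_cases hbig : (l.length : Int) ≤ s
  · have hmin : min s (l.length : Int) = (l.length : Int) := by omega
    have hdrop : l.drop s.toNat = [] := List.drop_eq_nil_of_le (by omega)
    rw [hmin, if_neg (by omega : ¬ ((l.length : Int) < (l.length : Int))), hdrop]
    simp [pvEvery2]
  · push_neg at hbig
    have hmin : min s (l.length : Int) = s := by omega
    rw [hmin, if_pos hbig]
    have hcnt : (((l.length : Int) - s + 2 - 1) / 2).toNat = ((l.drop s.toNat).length + 1) / 2 := by
      simp only [List.length_drop]; omega
    rw [hcnt]
    have hidx : ∀ k : Nat, l[(s + 2 * (k : Int)).toNat]? = (l.drop s.toNat)[2 * k]? := by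
      intro k
      have h : (s + 2 * (k : Int)).toNat = s.toNat + 2 * k := by omega
      rw [h, List.getElem?_drop]
    rw [List.filterMap_congr (fun k _ => hidx k), pvFMR]

lemma pvJoinNil (parts : List (List Char)) :
    PySem.Chars.join [] parts = parts.flatten := by
  induction parts with
  | nil => simp [PySem.Chars.join_nil]
  | cons p ps ih =>
    cases ps with
    | nil => simp [PySem.Chars.join_singleton]
    | cons q rest => rw [PySem.Chars.join_cons_cons]; simp_all

-- B's fold over the enumerated segments computes pvSegJoin
lemma pvB_fold (segs : List (List Char)) : ∀ (k pos : Int) (parts : List (List Char)),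
    PySem.Chars.join [] ((PySem.List.enumerate segs k).foldl pvStepB (parts, pos)).1
      = PySem.Chars.join [] parts ++ pvSegJoin k pos segs := by
  induction segs with
  | nil => intro k pos parts; simp [pvSegJoin]
  | cons seg rest ih =>
    intro k pos parts
    rw [PySem.List.enumerate_cons]
    simp only [List.foldl, pvStepB]
    rw [ih]
    simp only [pvJoinNil, List.flatten_append, pvSegJoin]
    rw [pvSlice2 _ _ (PySem.Int.mod_nonneg _ (by norm_num))]
    simp [List.append_assoc]

lemma pvMod2 (a : Int) : PySem.Int.mod a 2 = a % 2 := by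
  rw [PySem.Int.mod, Int.fmod_eq_emod]; simp

-- the heart: segment-wise stride-2 extraction equals A's pick
lemma pvSeg_eq_pick (l : List Char) : ∀ (k pos m : Int),
    m = PySem.Int.mod k 2 →
    pvSegJoin k pos (pvSplit1 l) = pvPick pos m l := by
  induction l with
  | nil => intro k pos m _; simp [pvSplit1, pvSegJoin, pvPick, pvEvery2]
  | cons c cs ih =>
    intro k pos m hm
    by_cases hc : c = '1'
    · subst hc
      simp only [pvSplit1, pvSegJoin, pvPick, ite_true]
      simp only [List.drop_nil, List.length_nil, Nat.cast_zero, add_zero, pvEvery2,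
        List.nil_append]
      exact ih (k + 1) (pos + 1) (1 - m) (by rw [pvMod2] at hm ⊢; omega)
    · cases hsp : pvSplit1 cs with
      | nil => exact absurd hsp (pvSplit1_ne_nil cs)
      | cons s ss =>
        have ihcs := ih k (pos + 1) m hm
        rw [hsp] at ihcs
        simp only [pvSplit1, if_neg hc, hsp, pvSegJoin, pvPick]
        by_cases he : PySem.Int.mod (k + pos) 2 = 0
        · have hpm : PySem.Int.mod pos 2 = m := by
            rw [pvMod2] at *; subst hm; omega
          have hnext : PySem.Int.mod (k + (pos + 1)) 2 = 1 := by
            rw [pvMod2] at *; omega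
          rw [he, Int.toNat_zero, List.drop_zero, pvEvery2_cons, if_pos hpm]
          simp only [pvSegJoin, hnext] at ihcs ⊢
          rw [show (1 : Int).toNat = 1 from rfl] at ihcs
          rw [show pos + (c :: s).length + 1 = (pos + 1) + s.length + 1 by simp; ring]
          simp only [← ihcs]
          simp
        · have h2 : PySem.Int.mod (k + pos) 2 = 1 := by
            have := PySem.Int.mod_nonneg (k + pos) (by norm_num : (0:Int) < 2)
            have := PySem.Int.mod_lt (k + pos) (by norm_num : (0:Int) < 2)
            omega
          have hpm : ¬ (PySem.Int.mod pos 2 = m) := by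
            rw [pvMod2] at *; subst hm; omega
          have hnext : PySem.Int.mod (k + (pos + 1)) 2 = 0 := by
            rw [pvMod2] at *; omega
          rw [h2, if_neg hpm]
          simp only [pvSegJoin, hnext] at ihcs
          rw [show (1 : Int).toNat = 1 from rfl, List.drop_one]
          simp only [Int.toNat_zero, List.drop_zero] at ihcs
          rw [show pos + (c :: s).length + 1 = (pos + 1) + s.length + 1 by simp; ring]
          rw [← ihcs]
          simp [List.tail]

lemma pvMap_singleton_nil (l : List Char) :
    (l.map (fun c => [c]) = ([] : List (List Char))) ↔ l = [] := by
  cases l <;> simp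

-- ===== VERDICT (by name: the statement is the Claim_ definition above) =====
theorem solution_spec : Claim_equal_solution := by
  intro code _
  unfold Spec_solution
  simp only [solution, solution_alt]
  rw [pvSplitOn_eq, pvB_fold, pvSeg_eq_pick code.toList 0 0 0 (by decide),
    pvA_loop code.toList 0 [] 0 (Or.inl rfl), List.nil_append]
  simp only [PySem.Chars.join_nil]
  simp only [List.nil_append]
  by_cases h : pvPick 0 0 code.toList = []
  · simp only [h, List.map_nil]
    decide
  · have hm : (pvPick 0 0 code.toList).map (fun c => [c]) ≠ [] := by
      simpa [pvMap_singleton_nil] using h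
    rw [if_neg hm, PySem.Chars.join_nil_singletons, if_neg h]
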